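-- pv_equiv track=rewrite | github.com/rengotaku/my-boilerplate | python-web/tests/test_production.py | _extract_target_section
-- ===== SOURCE A (Python) =====
-- def _extract_target_section(content: str, target: str) -> str:
--     """Makefile から指定ターゲットのセクションを抽出する."""
--     lines = content.split("\n")
--     section_lines: list[str] = []
--     in_section = False
--     for line in lines:
--         if line.startswith(f"{target}:"):
--             in_section = True
--             section_lines.append(line)
--             continue
--         if in_section:
--             if line.startswith("\t"):
--                 section_lines.append(line)
--             else:
--                 break
--     return "\n".join(section_lines)
-- ===== SOURCE B (Python) =====
-- def _extract_target_section(content: str, target: str) -> str: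
--     """Makefile から指定ターゲットのセクションを抽出する (locate-then-scan)."""
--     prefix = target + ":"
--     lines = content.split("\n")
--     # phase 1: drop everything before the first target line
--     while lines and not lines[0].startswith(prefix):
--         lines = lines[1:]
--     if not lines:
--         return ""
--     # phase 2: collect the section
--     out = []
--     for line in lines:
--         if line.startswith(prefix) or line.startswith("\t"):
--             out.append(line)
--         else:
--             break
--     return "\n".join(out)
-- ===== Notes on version B (the rewrite author's own statement) =====
-- stated objective: alternative
-- what changed: Replaces A's single flag-driven pass (in_section state variable) with a two-phase locate-then-scan: first skip lines until the first one starting with 'target:', then collect lines while they start with 'target:' or a tab.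
import Mathlib
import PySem

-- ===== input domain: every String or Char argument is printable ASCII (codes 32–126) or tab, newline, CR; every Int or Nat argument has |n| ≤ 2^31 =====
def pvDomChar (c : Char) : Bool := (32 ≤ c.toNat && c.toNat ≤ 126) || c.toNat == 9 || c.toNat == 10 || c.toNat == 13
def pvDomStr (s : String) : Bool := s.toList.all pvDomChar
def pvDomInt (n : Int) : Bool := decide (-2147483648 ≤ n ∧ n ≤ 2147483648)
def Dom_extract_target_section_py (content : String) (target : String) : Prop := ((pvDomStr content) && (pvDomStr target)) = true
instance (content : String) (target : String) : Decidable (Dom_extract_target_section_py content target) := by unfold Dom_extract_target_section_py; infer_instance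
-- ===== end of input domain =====

-- B replaces A's flag-driven single pass by a locate-then-scan decomposition (skip to the first
-- target line, then collect the section); same cost, no in_section state variable.

-- ===== PORT A =====  (ported over code-point lists via PySem.Chars; exact on the ASCII domain)
-- the for-loop of A: state = (section_lines, in_section), early return on break
def pvLoopA (pfx : List Char) : List (List Char) → List (List Char) → Bool → List (List Char)
  | [], acc, _ => acc
  | l :: ls, acc, ins =>
    if PySem.Chars.startswith l pfx then pvLoopA pfx ls (acc ++ [l]) true
    else if ins then
      if PySem.Chars.startswith l ['\t'] then pvLoopA pfx ls (acc ++ [l]) true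
      else acc
    else pvLoopA pfx ls acc false

def extract_target_section_py (content : String) (target : String) : String :=
  String.ofList (PySem.Chars.join ['\n']
    (pvLoopA (target.toList ++ [':']) (PySem.Chars.splitOn content.toList ['\n']) [] false))

-- ===== PORT B =====
-- phase 1 of B: the while-loop dropping lines until one starts with the prefix
def pvSkipTo (pfx : List Char) : List (List Char) → List (List Char)
  | [] => []
  | l :: ls => if PySem.Chars.startswith l pfx then l :: ls else pvSkipTo pfx ls

-- phase 2 of B: the collect for-loop with break
def pvCollect (pfx : List Char) : List (List Char) → List (List Char)
  | [] => []
  | l :: ls =>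
    if PySem.Chars.startswith l pfx || PySem.Chars.startswith l ['\t'] then l :: pvCollect pfx ls
    else []

def extract_target_section_py_alt (content : String) (target : String) : String :=
  let pfx := target.toList ++ [':']
  let rest := pvSkipTo pfx (PySem.Chars.splitOn content.toList ['\n'])
  if rest = [] then ""
  else String.ofList (PySem.Chars.join ['\n'] (pvCollect pfx rest))

-- ===== PRECONDITION & SPEC =====
def Spec_extract_target_section_py (content : String) (target : String) (out : String) : Prop := out = extract_target_section_py_alt content target
instance (content : String) (target : String) (out : String) : Decidable (Spec_extract_target_section_py content target out) := by unfold Spec_extract_target_section_py; infer_instance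

-- ===== CLAIM (what is proved, stated in full; the proofs are below) =====
def Claim_equal_extract_target_section_py : Prop := ∀ (content : String) (target : String), Dom_extract_target_section_py content target → Spec_extract_target_section_py content target (extract_target_section_py content target)

-- ===== LEMMAS AND PROOFS =====
-- once in the section, A's loop appends exactly what B's collect loop produces
theorem pvLoopA_true (pfx : List Char) : ∀ (ls acc : List (List Char)),
    pvLoopA pfx ls acc true = acc ++ pvCollect pfx ls := by
  intro ls
  induction ls with
  | nil => intro acc; simp [pvLoopA, pvCollect]
  | cons l ls ih =>
    intro acc
    by_cases h : PySem.Chars.startswith l pfx = true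
    · simp [pvLoopA, pvCollect, h, ih]
    · by_cases ht : PySem.Chars.startswith l ['\t'] = true
      · simp [pvLoopA, pvCollect, h, ht, ih]
      · simp [pvLoopA, pvCollect, h, ht]

-- before the section, A's loop just skips, like B's phase 1
theorem pvLoopA_false (pfx : List Char) : ∀ (ls : List (List Char)),
    pvLoopA pfx ls [] false = pvCollect pfx (pvSkipTo pfx ls) := by
  intro ls
  induction ls with
  | nil => simp [pvLoopA, pvSkipTo, pvCollect]
  | cons l ls ih =>
    by_cases h : PySem.Chars.startswith l pfx = true
    · simp [pvLoopA, pvSkipTo, pvCollect, h, pvLoopA_true]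
    · simp [pvLoopA, pvSkipTo, h, ih]

-- ===== VERDICT (by name: the statement is the Claim_ definition above) =====
theorem extract_target_section_py_spec : Claim_equal_extract_target_section_py := by
  intro content target _
  unfold Spec_extract_target_section_py extract_target_section_py extract_target_section_py_alt
  rw [pvLoopA_false]
  by_cases h : pvSkipTo (target.toList ++ [':']) (PySem.Chars.splitOn content.toList ['\n']) = []
  · simp [h, pvCollect]
  · simp [h]
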